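-- pv_equiv track=rewrite | github.com/G-Sudarshan-Reddy/fabric_mcp_agent | fabricops_mcp/tools/stage2_pipeline.py | _pick_key_columns
-- ===== SOURCE A (Python) =====
-- from typing import Any
--
-- def _pick_key_columns(columns: list[dict[str, Any]]) -> list[str]:
-- 	keys: list[str] = []
-- 	for col in columns:
-- 		name = str(col.get("name", ""))
-- 		inferred = str(col.get("inferred_type", "")).lower()
-- 		lname = name.lower()
-- 		if inferred in {"string", "object", "text"} and any(
-- 			token in lname for token in ("id", "name", "code", "key")
-- 		):
-- 			keys.append(name)
--
-- 	if keys: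
-- 		return keys
--
-- 	for col in columns:
-- 		if str(col.get("inferred_type", "")).lower() in {"string", "object", "text"}:
-- 			return [str(col.get("name"))]
--
-- 	return [str(columns[0].get("name"))] if columns else []
-- ===== SOURCE B (Python) =====
-- def _pick_key_columns(columns: list) -> list:
--     keys = []
--     first_string = None
--     have_string = False
--     for col in columns:
--         if str(col.get("inferred_type", "")).lower() in ("string", "object", "text"):
--             if not have_string:
--                 have_string = True
--                 first_string = str(col.get("name"))
--             name = str(col.get("name", ""))
--             if any(tok in name.lower() for tok in ("id", "name", "code", "key")):
--                 keys.append(name)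
--     if keys:
--         return keys
--     if have_string:
--         return [first_string]
--     return [str(columns[0].get("name"))] if columns else []
-- ===== Notes on version B (the rewrite author's own statement) =====
-- stated objective: alternative
-- what changed: B makes a single pass over the columns, tracking both the token-matched keys and the first string-typed column's fallback name as it goes, instead of A's three sequential scans.
import Mathlib
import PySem

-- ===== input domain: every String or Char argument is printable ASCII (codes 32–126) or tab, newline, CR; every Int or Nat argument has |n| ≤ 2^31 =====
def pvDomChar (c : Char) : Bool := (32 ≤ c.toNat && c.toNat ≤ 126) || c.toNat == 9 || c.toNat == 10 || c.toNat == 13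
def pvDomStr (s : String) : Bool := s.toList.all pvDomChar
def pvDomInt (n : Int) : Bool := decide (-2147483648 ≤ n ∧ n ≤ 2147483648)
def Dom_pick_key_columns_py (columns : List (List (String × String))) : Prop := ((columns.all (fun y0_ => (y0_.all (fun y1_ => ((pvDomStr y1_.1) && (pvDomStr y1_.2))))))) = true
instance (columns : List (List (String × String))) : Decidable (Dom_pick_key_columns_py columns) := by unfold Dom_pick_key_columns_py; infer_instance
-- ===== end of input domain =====

-- B fuses A's three scans into one pass that tracks the key list and the first string-typed fallback together (objective: alternative decomposition, same cost).

-- shared primitives (exact Python semantics)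
-- str(col.get(k)) with no default: Python prints None as "None"
def pyStrOpt (o : Option String) : String := match o with | none => "None" | some s => s
-- inferred_type in {"string", "object", "text"}
def pvIsStrType (t : String) : Bool := t == "string" || t == "object" || t == "text"
-- any(token in lname for token in ("id", "name", "code", "key"))
def pvHasToken (l : String) : Bool :=
  PySem.Str.isIn "id" l || PySem.Str.isIn "name" l || PySem.Str.isIn "code" l || PySem.Str.isIn "key" l

-- ===== PORT A =====
-- A's first loop: collect matching names in order
def pvAStep (keys : List String) (col : List (String × String)) : List String :=
  let name := (PySem.Dict.mk col).getD "name" ""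
  let inferred := PySem.Str.lower ((PySem.Dict.mk col).getD "inferred_type" "")
  let lname := PySem.Str.lower name
  if pvIsStrType inferred && pvHasToken lname then keys ++ [name] else keys

-- A's second loop: first string-typed column, early return
def pvAFallback : List (List (String × String)) → Option String
  | [] => none
  | col :: rest =>
    if pvIsStrType (PySem.Str.lower ((PySem.Dict.mk col).getD "inferred_type" "")) then
      some (pyStrOpt ((PySem.Dict.mk col).get? "name"))
    else pvAFallback rest

def pick_key_columns_py (columns : List (List (String × String))) : List String :=
  let keys := columns.foldl pvAStep []
  if keys ≠ [] then keys
  else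
    match pvAFallback columns with
    | some s => [s]
    | none =>
      match columns with
      | [] => []
      | c :: _ => [pyStrOpt ((PySem.Dict.mk c).get? "name")]

-- ===== PORT B =====
-- single pass: state = (keys so far, first string-typed fallback if seen)
def pvBStep (st : List String × Option String) (col : List (String × String)) : List String × Option String :=
  if pvIsStrType (PySem.Str.lower ((PySem.Dict.mk col).getD "inferred_type" "")) then
    let first :=
      match st.2 with
      | some s => some s
      | none => some (pyStrOpt ((PySem.Dict.mk col).get? "name"))
    let name := (PySem.Dict.mk col).getD "name" ""
    if pvHasToken (PySem.Str.lower name) then (st.1 ++ [name], first) else (st.1, first)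
  else st

def pick_key_columns_py_alt (columns : List (List (String × String))) : List String :=
  let st := columns.foldl pvBStep ([], none)
  if st.1 ≠ [] then st.1
  else
    match st.2 with
    | some s => [s]
    | none =>
      match columns with
      | [] => []
      | c :: _ => [pyStrOpt ((PySem.Dict.mk c).get? "name")]

-- ===== PRECONDITION & SPEC =====
def Spec_pick_key_columns_py (columns : List (List (String × String))) (out : List String) : Prop := out = pick_key_columns_py_alt columns
instance (columns : List (List (String × String))) (out : List String) : Decidable (Spec_pick_key_columns_py columns out) := by unfold Spec_pick_key_columns_py; infer_instance

-- ===== CLAIM (what is proved, stated in full; the proofs are below) =====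
def Claim_equal_pick_key_columns_py : Prop := ∀ (columns : List (List (String × String))), Dom_pick_key_columns_py columns → Spec_pick_key_columns_py columns (pick_key_columns_py columns)

-- ===== LEMMAS AND PROOFS =====

-- B's fused fold computes A's keys fold and A's fallback scan at once
lemma pvBStep_fold (cols : List (List (String × String))) (keys : List String) (first : Option String) :
    cols.foldl pvBStep (keys, first) =
      (cols.foldl pvAStep keys,
       match first with | some s => some s | none => pvAFallback cols) := by
  induction cols generalizing keys first with
  | nil => cases first <;> simp [pvAFallback]
  | cons c rest ih =>
    simp only [List.foldl_cons, pvBStep, pvAStep, pvAFallback]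
    by_cases ht : pvIsStrType (PySem.Str.lower ((PySem.Dict.mk c).getD "inferred_type" "")) = true
    · simp only [ht, if_true, Bool.true_and]
      by_cases hk : pvHasToken (PySem.Str.lower ((PySem.Dict.mk c).getD "name" "")) = true
      · simp only [hk, if_true, ih]
        cases first <;> rfl
      · simp only [Bool.not_eq_true] at hk
        simp only [hk, Bool.false_eq_true, if_false, ih]
        cases first <;> rfl
    · simp only [Bool.not_eq_true] at ht
      simp only [ht, Bool.false_eq_true, Bool.false_and, if_false, ih]

-- ===== VERDICT (by name: the statement is the Claim_ definition above) =====
theorem pick_key_columns_py_spec : Claim_equal_pick_key_columns_py := by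
  intro columns _
  show pick_key_columns_py columns = pick_key_columns_py_alt columns
  unfold pick_key_columns_py pick_key_columns_py_alt
  rw [pvBStep_fold]
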